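-- pv_equiv track=rewrite | github.com/TDA-Jyamiti/halluzig | utils.py | parse_bars
-- ===== SOURCE A (Python) =====
-- def parse_bars(bars, bar_mapping, num_graphs):
--     h0_bars, h1_bars = [], []
--     for bar in bars:
--         try: bar_mapping[bar[0]]
--         except KeyError: bar_mapping[bar[0]] = num_graphs
--         try : bar_mapping[bar[1]]
--         except KeyError: bar_mapping[bar[1]] = num_graphs
--         if bar_mapping[bar[0]] != bar_mapping[bar[1]]:
--             if bar[2] == 0:
--                 h0_bars.append([bar_mapping[bar[0]], bar_mapping[bar[1]]])
--             elif bar[2] == 1: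
--                 h1_bars.append([bar_mapping[bar[0]], bar_mapping[bar[1]]])
--
--     return h0_bars, h1_bars
-- ===== SOURCE B (Python) =====
-- def parse_bars(bars, bar_mapping, num_graphs):
--     # Key observation: every endpoint missing from bar_mapping gets the SAME value
--     # num_graphs, so the in-place population never changes what any lookup returns.
--     # B is therefore a stateless two-stage pipeline over the ORIGINAL mapping:
--     # resolve each bar to a (u, v, dim) triple, then partition the kept triples.
--     # (A also mutates bar_mapping in place; B does not — return value only.)
--     val = bar_mapping.get
--     edges = [(val(b[0], num_graphs), val(b[1], num_graphs), b[2])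
--              for b in bars
--              if val(b[0], num_graphs) != val(b[1], num_graphs)]
--     h0_bars = [[u, v] for (u, v, d) in edges if d == 0]
--     h1_bars = [[u, v] for (u, v, d) in edges if d == 1]
--     return h0_bars, h1_bars
-- ===== Notes on version B (the rewrite author's own statement) =====
-- stated objective: alternative
-- what changed: A threads a mutable dict through a single stateful loop (try/except KeyError inserts, then conditional appends); B exploits that every missing endpoint is assigned the same value num_graphs -- so the mutation can never change any lookup -- and becomes a stateless two-stage pipeline over the original mapping: resolve bars to (u,v,dim) triples with dict.get(k, num_graphs), then partition the kept triples into h0/h1. B does not mutate bar_mapping (return-value equivalence only).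
import Mathlib
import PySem

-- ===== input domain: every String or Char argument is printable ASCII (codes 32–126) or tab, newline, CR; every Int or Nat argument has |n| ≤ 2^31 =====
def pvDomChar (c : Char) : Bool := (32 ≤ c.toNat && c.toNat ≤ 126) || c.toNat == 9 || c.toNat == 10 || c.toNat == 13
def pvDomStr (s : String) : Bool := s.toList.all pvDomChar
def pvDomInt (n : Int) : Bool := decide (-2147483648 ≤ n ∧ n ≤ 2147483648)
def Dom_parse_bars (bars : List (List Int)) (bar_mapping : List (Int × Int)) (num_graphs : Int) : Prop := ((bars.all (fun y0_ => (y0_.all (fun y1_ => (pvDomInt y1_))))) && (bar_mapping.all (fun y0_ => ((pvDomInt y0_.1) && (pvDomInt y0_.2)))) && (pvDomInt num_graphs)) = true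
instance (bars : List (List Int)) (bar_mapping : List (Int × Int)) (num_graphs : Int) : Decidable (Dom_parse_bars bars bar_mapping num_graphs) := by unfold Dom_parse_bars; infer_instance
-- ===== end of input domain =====

-- B replaces A's stateful mutate-and-append loop by a stateless pipeline over the
-- ORIGINAL mapping (missing keys all map to the same num_graphs, so the mutation is
-- output-irrelevant); A mutates bar_mapping in place, B does not — return value only.

-- ===== PORT A =====
-- single fold carrying (mapping, h0, h1); try/except KeyError ported as get?-test + insert
def parse_bars (bars : List (List Int)) (bar_mapping : List (Int × Int)) (num_graphs : Int) : List (List Int) × List (List Int) :=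
  let r := bars.foldl
    (fun (st : PySem.Dict Int Int × List (List Int) × List (List Int)) bar =>
      match PySem.List.pyGet? bar 0, PySem.List.pyGet? bar 1 with
      | some b0, some b1 =>
        let m := if ((st.1).get? b0).isSome then st.1 else (st.1).insert b0 num_graphs
        let m := if (m.get? b1).isSome then m else m.insert b1 num_graphs
        -- bar_mapping[bar[i]]: both keys are present here (just set), so the default is never used
        if m.getD b0 num_graphs ≠ m.getD b1 num_graphs then
          match PySem.List.pyGet? bar 2 with
          | some b2 =>
            if b2 = 0 then (m, st.2.1 ++ [[m.getD b0 num_graphs, m.getD b1 num_graphs]], st.2.2)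
            else if b2 = 1 then (m, st.2.1, st.2.2 ++ [[m.getD b0 num_graphs, m.getD b1 num_graphs]])
            else (m, st.2.1, st.2.2)
          | none => (m, st.2.1, st.2.2)   -- IndexError: excluded by Pre_
        else (m, st.2.1, st.2.2)
      | _, _ => st)                        -- IndexError: excluded by Pre_
    (PySem.Dict.mk bar_mapping, [], [])
  (r.2.1, r.2.2)

-- ===== PORT B =====
-- stage 1: resolve bars to (u, v, dim) triples via dict.get on the ORIGINAL mapping;
-- stage 2: partition the kept triples. No mutation anywhere.
def parse_bars_alt (bars : List (List Int)) (bar_mapping : List (Int × Int)) (num_graphs : Int) : List (List Int) × List (List Int) :=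
  let val := fun (k : Int) => (PySem.Dict.mk bar_mapping).getD k num_graphs
  let edges := bars.filterMap (fun b =>
    match PySem.List.pyGet? b 0 with
    | none => none                         -- IndexError: excluded by Pre_
    | some b0 =>
      match PySem.List.pyGet? b 1 with
      | none => none                       -- IndexError: excluded by Pre_
      | some b1 =>
        if val b0 ≠ val b1 then
          match PySem.List.pyGet? b 2 with
          | some b2 => some (val b0, val b1, b2)
          | none => none                   -- IndexError: excluded by Pre_
        else none)
  let h0_bars := edges.filterMap (fun e => if e.2.2 = 0 then some [e.1, e.2.1] else none)
  let h1_bars := edges.filterMap (fun e => if e.2.2 = 1 then some [e.1, e.2.1] else none)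
  (h0_bars, h1_bars)

-- ===== PRECONDITION & SPEC =====
-- Pre_ is exactly where Python A returns: each bar needs bar[0] and bar[1] (length ≥ 2), and
-- bar[2] (length ≥ 3) unless the two endpoints map to equal values (lookup-or-num_graphs on the
-- ORIGINAL mapping — the in-place default assignments never change a lookup), in which case
-- A never reads bar[2].
def Pre_parse_bars (bars : List (List Int)) (bar_mapping : List (Int × Int)) (num_graphs : Int) : Prop :=
  ∀ bar ∈ bars, 2 ≤ bar.length ∧
    (3 ≤ bar.length ∨
      (PySem.Dict.mk bar_mapping).getD bar.headI num_graphs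
        = (PySem.Dict.mk bar_mapping).getD bar.tail.headI num_graphs)
instance (bars : List (List Int)) (bar_mapping : List (Int × Int)) (num_graphs : Int) : Decidable (Pre_parse_bars bars bar_mapping num_graphs) := by unfold Pre_parse_bars; infer_instance
def pvWitness_parse_bars : List (List Int) × (List (Int × Int)) × Int := ([[0, 1, 0], [1, 2, 1], [2, 2, 0]], [(0, 5)], 7)
def Spec_parse_bars (bars : List (List Int)) (bar_mapping : List (Int × Int)) (num_graphs : Int) (out : List (List Int) × List (List Int)) : Prop := out = parse_bars_alt bars bar_mapping num_graphs
instance (bars : List (List Int)) (bar_mapping : List (Int × Int)) (num_graphs : Int) (out : List (List Int) × List (List Int)) : Decidable (Spec_parse_bars bars bar_mapping num_graphs out) := by unfold Spec_parse_bars; infer_instance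

-- ===== CLAIM (what is proved, stated in full; the proofs are below) =====
def Claim_equal_parse_bars : Prop := ∀ (bars : List (List Int)) (bar_mapping : List (Int × Int)) (num_graphs : Int), Dom_parse_bars bars bar_mapping num_graphs → Pre_parse_bars bars bar_mapping num_graphs → Spec_parse_bars bars bar_mapping num_graphs (parse_bars bars bar_mapping num_graphs)

-- ===== LEMMAS AND PROOFS =====

-- canonical per-bar decision computed from the ORIGINAL mapping
def pvKeep (bar_mapping : List (Int × Int)) (num_graphs d : Int) (bar : List Int) : Option (List Int) :=
  match PySem.List.pyGet? bar 0, PySem.List.pyGet? bar 1 with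
  | some b0, some b1 =>
    let V := fun k => (PySem.Dict.mk bar_mapping).getD k num_graphs
    if V b0 ≠ V b1 then
      match PySem.List.pyGet? bar 2 with
      | some b2 => if b2 = d then some [V b0, V b1] else none
      | none => none
    else none
  | _, _ => none

-- inserting a key with the default value v preserves every getD-with-default-v
theorem pv_insertsd_getD (m : PySem.Dict Int Int) (k k' v : Int)
    (h : (m.get? k).isSome = false) : (m.insert k v).getD k' v = m.getD k' v := by
  rw [PySem.Dict.getD_insert]
  split
  · rename_i hk; subst hk
    rw [PySem.Dict.getD_eq_get?_getD]
    cases hg : m.get? k' with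
    | some w => rw [hg] at h; simp at h
    | none => rfl
  · rfl

theorem pv_sd2_getD (m : PySem.Dict Int Int) (b0 b1 k v : Int) :
    (let m1 := if (m.get? b0).isSome then m else m.insert b0 v
     if (m1.get? b1).isSome then m1 else m1.insert b1 v).getD k v = m.getD k v := by
  have step : ∀ (d : PySem.Dict Int Int) (a : Int),
      (if (d.get? a).isSome then d else d.insert a v).getD k v = d.getD k v := by
    intro d a
    by_cases h : ((d.get? a).isSome : Prop)
    · simp only [h, if_true]
    · rw [if_neg (by simpa using h), pv_insertsd_getD _ _ _ _ (by simpa using h)]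
  simp only []
  rw [step, step]

-- A's fold, with any mapping m whose getD-with-default agrees with the original, appends
-- exactly the canonical filterMaps.
theorem pv_A_fold (bar_mapping : List (Int × Int)) (num_graphs : Int)
    (bars : List (List Int)) (m : PySem.Dict Int Int) (h0 h1 : List (List Int))
    (hm : ∀ k, m.getD k num_graphs = (PySem.Dict.mk bar_mapping).getD k num_graphs)
    (hpre : ∀ bar ∈ bars, 2 ≤ bar.length ∧
      (3 ≤ bar.length ∨
        (PySem.Dict.mk bar_mapping).getD bar.headI num_graphs
          = (PySem.Dict.mk bar_mapping).getD bar.tail.headI num_graphs)) :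
    (bars.foldl
      (fun (st : PySem.Dict Int Int × List (List Int) × List (List Int)) bar =>
        match PySem.List.pyGet? bar 0, PySem.List.pyGet? bar 1 with
        | some b0, some b1 =>
          let m := if ((st.1).get? b0).isSome then st.1 else (st.1).insert b0 num_graphs
          let m := if (m.get? b1).isSome then m else m.insert b1 num_graphs
          if m.getD b0 num_graphs ≠ m.getD b1 num_graphs then
            match PySem.List.pyGet? bar 2 with
            | some b2 =>
              if b2 = 0 then (m, st.2.1 ++ [[m.getD b0 num_graphs, m.getD b1 num_graphs]], st.2.2)
              else if b2 = 1 then (m, st.2.1, st.2.2 ++ [[m.getD b0 num_graphs, m.getD b1 num_graphs]])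
              else (m, st.2.1, st.2.2)
            | none => (m, st.2.1, st.2.2)
          else (m, st.2.1, st.2.2)
        | _, _ => st)
      (m, h0, h1)).2
    = (h0 ++ bars.filterMap (pvKeep bar_mapping num_graphs 0),
       h1 ++ bars.filterMap (pvKeep bar_mapping num_graphs 1)) := by
  induction bars generalizing m h0 h1 with
  | nil => simp
  | cons bar rest ih =>
    obtain ⟨hlen, hdisj⟩ := hpre bar (List.mem_cons_self)
    obtain ⟨b0, b1, tl, rfl⟩ : ∃ b0 b1 tl, bar = b0 :: b1 :: tl := by
      match bar, hlen with
      | b0 :: b1 :: tl, _ => exact ⟨b0, b1, tl, rfl⟩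
    have hrest : ∀ bar ∈ rest, 2 ≤ bar.length ∧
      (3 ≤ bar.length ∨
        (PySem.Dict.mk bar_mapping).getD bar.headI num_graphs
          = (PySem.Dict.mk bar_mapping).getD bar.tail.headI num_graphs) :=
      fun b hb => hpre b (List.mem_cons_of_mem _ hb)
    have hg0 : PySem.List.pyGet? (b0 :: b1 :: tl) (0 : Int) = some b0 := by
      simp [PySem.List.pyGet?, PySem.List.pyIdx?, show (0:Int) ≤ (tl.length : Int) + 1 by omega]
    have hg1 : PySem.List.pyGet? (b0 :: b1 :: tl) (1 : Int) = some b1 := by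
      simp [PySem.List.pyGet?, PySem.List.pyIdx?]
    simp only [List.foldl_cons, hg0, hg1, List.filterMap_cons]
    set m1 := (if (m.get? b0).isSome then m else m.insert b0 num_graphs) with hm1
    set m2 := (if (m1.get? b1).isSome then m1 else m1.insert b1 num_graphs) with hm2def
    have hkey : ∀ k, m2.getD k num_graphs = m.getD k num_graphs := by
      intro k
      rw [hm2def, hm1]
      exact pv_sd2_getD m b0 b1 k num_graphs
    have hm' : ∀ k, m2.getD k num_graphs = (PySem.Dict.mk bar_mapping).getD k num_graphs :=
      fun k => (hkey k).trans (hm k)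
    rw [hm' b0, hm' b1]
    by_cases hne : (PySem.Dict.mk bar_mapping).getD b0 num_graphs
        = (PySem.Dict.mk bar_mapping).getD b1 num_graphs
    · rw [if_neg (not_not_intro hne)]
      have k0 : pvKeep bar_mapping num_graphs 0 (b0 :: b1 :: tl) = none := by
        simp [pvKeep, hg0, hne]
      have k1 : pvKeep bar_mapping num_graphs 1 (b0 :: b1 :: tl) = none := by
        simp [pvKeep, hg0, hne]
      rw [k0, k1, ih m2 h0 h1 hm' hrest]
    · rw [if_pos hne]
      have h3 : 3 ≤ (b0 :: b1 :: tl).length := by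
        rcases hdisj with h | h
        · exact h
        · exact absurd h (by simpa using hne)
      obtain ⟨b2, tl2, rfl⟩ : ∃ b2 tl2, tl = b2 :: tl2 := by
        match tl, h3 with
        | b2 :: tl2, _ => exact ⟨b2, tl2, rfl⟩
      have hg2 : PySem.List.pyGet? (b0 :: b1 :: b2 :: tl2) (2 : Int) = some b2 := by
        simp [PySem.List.pyGet?, PySem.List.pyIdx?,
          show (2:Int) ≤ (tl2.length : Int) + 1 + 1 by omega]
      simp only [hg2]
      have k0 : pvKeep bar_mapping num_graphs 0 (b0 :: b1 :: b2 :: tl2)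
          = if b2 = 0 then some [(PySem.Dict.mk bar_mapping).getD b0 num_graphs,
                                 (PySem.Dict.mk bar_mapping).getD b1 num_graphs] else none := by
        simp [pvKeep, hg0, hg1, hg2, hne]
      have k1 : pvKeep bar_mapping num_graphs 1 (b0 :: b1 :: b2 :: tl2)
          = if b2 = 1 then some [(PySem.Dict.mk bar_mapping).getD b0 num_graphs,
                                 (PySem.Dict.mk bar_mapping).getD b1 num_graphs] else none := by
        simp [pvKeep, hg0, hg1, hg2, hne]
      by_cases hb2 : b2 = 0
      · subst hb2
        rw [if_pos rfl, ih m2 _ _ hm' hrest]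
        simp [k0, k1]
      · by_cases hb2' : b2 = 1
        · subst hb2'
          rw [if_neg (by norm_num), if_pos rfl, ih m2 _ _ hm' hrest]
          simp [k0, k1]
        · rw [if_neg hb2, if_neg hb2', ih m2 _ _ hm' hrest]
          simp [k0, k1, hb2, hb2']

-- B's staged pipeline equals the canonical filterMaps (fuse the two filterMap stages)
theorem pv_B_canon (bars : List (List Int)) (bar_mapping : List (Int × Int)) (num_graphs : Int) :
    parse_bars_alt bars bar_mapping num_graphs
      = (bars.filterMap (pvKeep bar_mapping num_graphs 0),
         bars.filterMap (pvKeep bar_mapping num_graphs 1)) := by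
  unfold parse_bars_alt
  refine Prod.ext ?_ ?_ <;>
  · simp only [List.filterMap_filterMap]
    apply List.filterMap_congr
    intro bar _
    simp only [pvKeep]
    cases PySem.List.pyGet? bar (0 : Int) with
    | none => rfl
    | some b0 =>
      cases PySem.List.pyGet? bar (1 : Int) with
      | none => rfl
      | some b1 =>
        by_cases hne : (PySem.Dict.mk bar_mapping).getD b0 num_graphs
            = (PySem.Dict.mk bar_mapping).getD b1 num_graphs
        · simp [hne]
        · cases PySem.List.pyGet? bar (2 : Int) with
          | none => simp [hne]
          | some b2 => by_cases h : b2 = (0:Int) <;> by_cases h1 : b2 = (1:Int) <;> simp [hne, h, h1, Option.bind]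

-- ===== VERDICT (by name: the statement is the Claim_ definition above) =====
theorem parse_bars_spec : Claim_equal_parse_bars := by
  intro bars bar_mapping num_graphs _ hpre
  unfold Spec_parse_bars
  rw [pv_B_canon]
  unfold parse_bars
  have hA := pv_A_fold bar_mapping num_graphs bars (PySem.Dict.mk bar_mapping) [] []
    (fun _ => rfl) hpre
  simp only [List.nil_append] at hA
  show ((bars.foldl _ (PySem.Dict.mk bar_mapping, [], [])).2.1,
        (bars.foldl _ (PySem.Dict.mk bar_mapping, [], [])).2.2) = _
  rw [← hA]
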